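-- pv_equiv track=rewrite | github.com/ank-man/Esocial_Evolution | run_validation_experiments.py | build_genome
-- ===== SOURCE A (Python) =====
-- from typing import Dict, List, Sequence, Tuple
--
-- def build_genome(n_chr: int, genes_per_chr: int) -> List[List[int]]:
--     gid = 1
--     genome: List[List[int]] = []
--     for _ in range(n_chr):
--         chrom = list(range(gid, gid + genes_per_chr))
--         gid += genes_per_chr
--         genome.append(chrom)
--     return genome
-- ===== SOURCE B (Python) =====
-- from typing import List
--
-- def build_genome(n_chr: int, genes_per_chr: int) -> List[List[int]]:
--     total = max(n_chr, 0) * max(genes_per_chr, 0)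
--     flat = list(range(1, total + 1))
--     return [flat[i * genes_per_chr:(i + 1) * genes_per_chr] for i in range(n_chr)]
-- ===== Notes on version B (the rewrite author's own statement) =====
-- stated objective: alternative
-- what changed: B materializes the full flat id sequence once and reshapes it into chromosomes by slicing, instead of A's per-chromosome loop that maintains a running gid accumulator and builds each range incrementally.
import Mathlib
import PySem

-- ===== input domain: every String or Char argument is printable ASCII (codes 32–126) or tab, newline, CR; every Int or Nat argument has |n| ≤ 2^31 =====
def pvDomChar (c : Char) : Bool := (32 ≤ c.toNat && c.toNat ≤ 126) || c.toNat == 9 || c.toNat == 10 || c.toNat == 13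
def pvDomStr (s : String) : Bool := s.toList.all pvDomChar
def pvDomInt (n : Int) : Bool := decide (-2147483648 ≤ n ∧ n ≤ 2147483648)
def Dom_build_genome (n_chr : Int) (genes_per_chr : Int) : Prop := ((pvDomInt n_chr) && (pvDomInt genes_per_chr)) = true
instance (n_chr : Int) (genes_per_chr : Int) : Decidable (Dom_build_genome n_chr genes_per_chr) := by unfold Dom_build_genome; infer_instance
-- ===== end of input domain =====

-- B builds the flat id sequence once and reshapes it by slicing, instead of A's running-gid loop (alternative decomposition, same cost).

-- ===== PORT A =====
-- gid accumulator + append per chromosome, step for step as in A.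
def build_genome (n_chr : Int) (genes_per_chr : Int) : List (List Int) :=
  ((PySem.List.pyRange 0 n_chr 1).foldl
    (fun (st : Int × List (List Int)) _ =>
      let chrom := PySem.List.pyRange st.1 (st.1 + genes_per_chr) 1
      (st.1 + genes_per_chr, st.2 ++ [chrom]))
    (1, [])).2

-- ===== PORT B =====
def build_genome_alt (n_chr : Int) (genes_per_chr : Int) : List (List Int) :=
  let total := max n_chr 0 * max genes_per_chr 0
  let flat := PySem.List.pyRange 1 (total + 1) 1
  (PySem.List.pyRange 0 n_chr 1).map
    (fun i => PySem.List.slice flat (some (i * genes_per_chr)) (some ((i + 1) * genes_per_chr)))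

-- ===== PRECONDITION & SPEC =====
def Spec_build_genome (n_chr : Int) (genes_per_chr : Int) (out : List (List Int)) : Prop := out = build_genome_alt n_chr genes_per_chr
instance (n_chr : Int) (genes_per_chr : Int) (out : List (List Int)) : Decidable (Spec_build_genome n_chr genes_per_chr out) := by unfold Spec_build_genome; infer_instance

-- ===== CLAIM (what is proved, stated in full; the proofs are below) =====
def Claim_equal_build_genome : Prop := ∀ (n_chr : Int) (genes_per_chr : Int), Dom_build_genome n_chr genes_per_chr → Spec_build_genome n_chr genes_per_chr (build_genome n_chr genes_per_chr)

-- ===== LEMMAS AND PROOFS =====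

-- A's fold appends chromosomes [gid+i*g, …) for i = 0 … l.length-1.
theorem buildA_foldl (g : Int) (l : List Int) (gid : Int) (acc : List (List Int)) :
    (l.foldl
      (fun (st : Int × List (List Int)) _ =>
        (st.1 + g, st.2 ++ [PySem.List.pyRange st.1 (st.1 + g) 1]))
      (gid, acc)).2
    = acc ++ (List.range l.length).map
        (fun (i : Nat) => PySem.List.pyRange (gid + (i : Int) * g) (gid + (i : Int) * g + g) 1) := by
  induction l generalizing gid acc with
  | nil => simp
  | cons x xs ih =>
    rw [List.foldl_cons, ih, List.length_cons, List.range_succ_eq_map, List.map_cons,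
      List.map_map]
    simp only [Nat.cast_zero, zero_mul, add_zero, List.append_assoc, List.cons_append,
      List.nil_append]
    congr 1
    congr 1
    apply List.map_congr_left
    intro i _
    simp only [Function.comp_apply]
    congr 1 <;> push_cast <;> ring

theorem slice_nil {α : Type} (a b : Int) : PySem.List.slice ([] : List α) (some a) (some b) = [] := by
  simp [PySem.List.slice]

-- the i-th slice of the flat sequence is exactly chromome i's range
theorem slice_flat (n g : Int) (i : Nat) (hi : (i : Int) < n) :
    PySem.List.slice (PySem.List.pyRange 1 (max n 0 * max g 0 + 1) 1)
      (some ((i : Int) * g)) (some (((i : Int) + 1) * g))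
    = PySem.List.pyRange (1 + (i : Int) * g) (1 + (i : Int) * g + g) 1 := by
  by_cases hg : g ≤ 0
  · have h1 : max n 0 * max g 0 + 1 ≤ 1 := by
      have : max g 0 = 0 := by omega
      simp [this]
    rw [PySem.List.pyRange_one_eq_nil h1, slice_nil,
      PySem.List.pyRange_one_eq_nil (by linarith)]
  · rw [not_le] at hg
    have h0 : (0 : Int) ≤ (i : Int) * g := by positivity
    have hmax : max n 0 * max g 0 = n * g := by
      have h1 : max n 0 = n := by omega
      have h2 : max g 0 = g := by omega
      rw [h1, h2]
    rw [hmax]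
    have h2 : (1 : Int) + (i : Int) * g + g ≤ n * g + 1 := by nlinarith
    have hsplit : PySem.List.pyRange 1 (n * g + 1) 1
        = PySem.List.pyRange 1 (1 + (i : Int) * g) 1
          ++ (PySem.List.pyRange (1 + (i : Int) * g) (1 + (i : Int) * g + g) 1
              ++ PySem.List.pyRange (1 + (i : Int) * g + g) (n * g + 1) 1) := by
      rw [← PySem.List.pyRange_one_append (1 + (i : Int) * g) (1 + (i : Int) * g + g)
            (n * g + 1) (by linarith) h2,
          ← PySem.List.pyRange_one_append 1 (1 + (i : Int) * g) (n * g + 1)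
            (by linarith) (by nlinarith)]
    have hlen1 : (PySem.List.pyRange 1 (1 + (i : Int) * g) 1).length = ((i : Int) * g).toNat := by
      rw [PySem.List.length_pyRange_one]; congr 1; ring
    have h3 : ((i : Int) + 1) * g = (i : Int) * g + g := by ring
    rw [hsplit, PySem.List.slice_toNat _ h0 (by positivity),
      List.drop_append_of_le_length (by omega), ← hlen1, List.drop_length, List.nil_append,
      hlen1]
    rw [List.take_append_of_le_length (by rw [PySem.List.length_pyRange_one]; omega)]
    apply List.take_of_length_le
    rw [PySem.List.length_pyRange_one]
    omega

-- ===== VERDICT (by name: the statement is the Claim_ definition above) =====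
theorem build_genome_spec : Claim_equal_build_genome := by
  intro n g _
  unfold Spec_build_genome build_genome build_genome_alt
  rw [buildA_foldl]
  rw [PySem.List.pyRange_one 0 n, List.map_map, List.length_map]
  simp only [List.nil_append, List.length_range]
  apply List.map_congr_left
  intro i hi
  rw [List.mem_range] at hi
  have hi' : (i : Int) < n := by omega
  simp only [Function.comp_apply, zero_add]
  rw [slice_flat n g i hi']
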